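-- pv_equiv track=rewrite | github.com/kbadova/SDA-2015 | week01/diveintopython.py | birthday_ranges
-- ===== SOURCE A (Python) =====
-- def birthday_ranges(birthdays, ranges):
--     list_of_count = []
--     for i in ranges:
--         count = 0
--         for j in birthdays:
--             if j >= i[0] and j <= i[1]:
--                 count += 1
--         list_of_count.append(count)
--     return list_of_count
-- ===== SOURCE B (Python) =====
-- def birthday_ranges(birthdays, ranges):
--     # Sort once, then answer each range with two hand-written binary searches
--     # (bisect cannot be imported here), clamping at 0 for empty/inverted ranges.
--     s = sorted(birthdays)
--     n = len(s)
--
--     def left(x, lo, hi):   # first index i in [lo, hi) with s[i] >= x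
--         if lo >= hi:
--             return lo
--         mid = (lo + hi) // 2
--         if s[mid] < x:
--             return left(x, mid + 1, hi)
--         return left(x, lo, mid)
--
--     def right(x, lo, hi):  # first index i in [lo, hi) with s[i] > x
--         if lo >= hi:
--             return lo
--         mid = (lo + hi) // 2
--         if s[mid] <= x:
--             return right(x, mid + 1, hi)
--         return right(x, lo, mid)
--
--     return [max(right(b, 0, n) - left(a, 0, n), 0) for (a, b) in ranges]
-- ===== Notes on version B (the rewrite author's own statement) =====
-- stated objective: faster
-- what changed: Instead of scanning all birthdays for every range, B sorts the birthdays once and answers each range with two hand-written binary searches (bisect-left/right), taking max(diff, 0) for inverted ranges.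
import Mathlib
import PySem

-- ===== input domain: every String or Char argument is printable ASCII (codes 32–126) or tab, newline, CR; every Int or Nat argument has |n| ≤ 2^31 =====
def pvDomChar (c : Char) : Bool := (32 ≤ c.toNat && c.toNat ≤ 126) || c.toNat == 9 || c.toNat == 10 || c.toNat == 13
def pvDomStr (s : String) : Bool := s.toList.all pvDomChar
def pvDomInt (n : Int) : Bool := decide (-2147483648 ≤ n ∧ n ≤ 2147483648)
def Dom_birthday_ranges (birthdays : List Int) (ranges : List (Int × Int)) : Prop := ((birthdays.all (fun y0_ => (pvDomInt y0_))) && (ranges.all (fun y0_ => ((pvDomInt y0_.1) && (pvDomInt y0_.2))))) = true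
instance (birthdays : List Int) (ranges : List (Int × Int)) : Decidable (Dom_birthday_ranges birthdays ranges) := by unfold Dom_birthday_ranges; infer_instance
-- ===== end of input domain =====

-- B sorts the birthdays once and answers each range with two binary searches
-- (hand-written, since A imports nothing), clamping at 0 for inverted ranges.

-- ===== PORT A =====
def birthday_ranges (birthdays : List Int) (ranges : List (Int × Int)) : List Int :=
  ranges.foldl
    (fun list_of_count i =>
      list_of_count ++
        [birthdays.foldl (fun count j => if j ≥ i.1 ∧ j ≤ i.2 then count + 1 else count) 0])
    []

-- ===== PORT B =====
-- helper 'left' of Source B: first index i in [lo, hi) with s[i] ≥ x.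
-- s[mid] is ported as pyGetD s mid 0: B only calls it with 0 ≤ lo ≤ mid < hi ≤ len(s),
-- so the index is always in range and the default is never taken (exact on B's calls).
def pvLeft (s : List Int) (x : Int) (lo hi : Int) : Int :=
  if _h : lo ≥ hi then lo
  else
    let mid := PySem.Int.floordiv (lo + hi) 2
    if PySem.List.pyGetD s mid 0 < x then pvLeft s x (mid + 1) hi
    else pvLeft s x lo mid
termination_by (hi - lo).toNat
decreasing_by
  · have hb := PySem.Int.floordiv_two_mid_bounds (lo := lo) (hi := hi) (by omega)
    omega
  · have hlt : PySem.Int.floordiv (lo + hi) 2 < hi :=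
      (PySem.Int.floordiv_lt_iff_lt_mul (by norm_num)).mpr (by omega)
    omega

-- helper 'right' of Source B: first index i in [lo, hi) with s[i] > x (same indexing remark).
def pvRight (s : List Int) (x : Int) (lo hi : Int) : Int :=
  if _h : lo ≥ hi then lo
  else
    let mid := PySem.Int.floordiv (lo + hi) 2
    if PySem.List.pyGetD s mid 0 ≤ x then pvRight s x (mid + 1) hi
    else pvRight s x lo mid
termination_by (hi - lo).toNat
decreasing_by
  · have hb := PySem.Int.floordiv_two_mid_bounds (lo := lo) (hi := hi) (by omega)
    omega
  · have hlt : PySem.Int.floordiv (lo + hi) 2 < hi :=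
      (PySem.Int.floordiv_lt_iff_lt_mul (by norm_num)).mpr (by omega)
    omega

def birthday_ranges_alt (birthdays : List Int) (ranges : List (Int × Int)) : List Int :=
  let s := PySem.List.sorted birthdays (fun x => x)
  let n : Int := s.length
  ranges.map (fun r => max (pvRight s r.2 0 n - pvLeft s r.1 0 n) 0)

-- ===== PRECONDITION & SPEC =====
def Spec_birthday_ranges (birthdays : List Int) (ranges : List (Int × Int)) (out : List Int) : Prop := out = birthday_ranges_alt birthdays ranges
instance (birthdays : List Int) (ranges : List (Int × Int)) (out : List Int) : Decidable (Spec_birthday_ranges birthdays ranges out) := by unfold Spec_birthday_ranges; infer_instance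

-- ===== CLAIM (what is proved, stated in full; the proofs are below) =====
def Claim_equal_birthday_ranges : Prop := ∀ (birthdays : List Int) (ranges : List (Int × Int)), Dom_birthday_ranges birthdays ranges → Spec_birthday_ranges birthdays ranges (birthday_ranges birthdays ranges)

-- ===== LEMMAS AND PROOFS =====

-- countP of a predicate that holds exactly on a prefix of indices counts that prefix.
lemma countP_eq_of_prefix (p : Int → Bool) :
    ∀ (s : List Int) (k : Nat), k ≤ s.length →
      (∀ i (h : i < s.length), p s[i] ↔ i < k) → s.countP p = k := by
  intro s
  induction s with
  | nil => intro k hk _; simpa using (Nat.le_zero.mp (by simpa using hk)).symm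
  | cons a t ih =>
    intro k hk hp
    cases k with
    | zero =>
      have ha : p a = false := by
        have := hp 0 (by simp)
        simpa using this
      have ht : t.countP p = 0 := by
        apply ih 0 (Nat.zero_le _)
        intro i h
        have := hp (i + 1) (by simpa using Nat.succ_lt_succ h)
        simpa using this
      simp [ha, ht]
    | succ k' =>
      have ha : p a = true := by
        have := hp 0 (by simp)
        simpa using this
      have ht : t.countP p = k' := by
        apply ih k' (by simpa using Nat.succ_le_succ_iff.mp hk)
        intro i h
        have := hp (i + 1) (by simpa using Nat.succ_lt_succ h)
        simpa [Nat.succ_lt_succ_iff] using this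
      simp [ha, ht]

-- pvLeft on a sorted list, under the binary-search invariant, computes countP (· < x).
lemma pvLeft_eq (s : List Int) (x : Int)
    (hs : List.Pairwise (fun a b => a ≤ b) s) :
    ∀ (n : Nat) (lo hi : Int), (hi - lo).toNat = n →
      0 ≤ lo → lo ≤ hi → hi ≤ s.length →
      (∀ i (h : i < s.length), (i : Int) < lo → s[i] < x) →
      (∀ i (h : i < s.length), hi ≤ (i : Int) → ¬ s[i] < x) →
      pvLeft s x lo hi = (s.countP (fun y => decide (y < x)) : Int) := by
  intro n
  induction n using Nat.strong_induction_on with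
  | _ n ih =>
    intro lo hi hn h0 hlh hhl hlow hhigh
    rw [pvLeft]
    by_cases hge : lo ≥ hi
    · have heq : lo = hi := le_antisymm hlh hge
      subst heq
      have hk : lo.toNat ≤ s.length := by omega
      have : s.countP (fun y => decide (y < x)) = lo.toNat := by
        apply countP_eq_of_prefix
        · exact hk
        · intro i h
          constructor
          · intro hp
            by_contra hc
            exact hhigh i h (by omega) (by simpa using hp)
          · intro hi2
            simpa using hlow i h (by omega)
        -- reorder: countP_eq_of_prefix takes (s) (k) hk hp
      simp [this]; omega
    · simp only [dif_neg hge]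
      have hlt : lo < hi := lt_of_not_ge hge
      have hmid := PySem.Int.floordiv_two_mid_bounds (lo := lo) (hi := hi) hlh
      have hmidlt : PySem.Int.floordiv (lo + hi) 2 < hi :=
        (PySem.Int.floordiv_lt_iff_lt_mul (by norm_num)).mpr (by omega)
      set mid := PySem.Int.floordiv (lo + hi) 2 with hmiddef
      have hmr : mid < (s.length : Int) := lt_of_lt_of_le hmidlt hhl
      have hget : PySem.List.pyGetD s mid 0 = s[mid.toNat]'(by omega) :=
        PySem.List.pyGetD_eq_getElem s 0 (by omega) hmr
      have hmono := List.pairwise_iff_getElem.mp hs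
      by_cases hc : PySem.List.pyGetD s mid 0 < x
      · rw [if_pos hc]
        apply ih (hi - (mid + 1)).toNat (by omega) (mid + 1) hi (rfl) (by omega) (by omega) hhl
        · intro i h hi2
          by_cases hieq : (i : Int) < lo
          · exact hlow i h hieq
          · have hile : i ≤ mid.toNat := by omega
            rcases lt_or_eq_of_le hile with hlt2 | heq2
            · exact lt_of_le_of_lt (hmono i mid.toNat h (by omega) hlt2) (hget ▸ hc)
            · subst heq2; exact hget ▸ hc
        · exact hhigh
      · rw [if_neg hc]
        apply ih (mid - lo).toNat (by omega) lo mid (rfl) h0 (by omega) (by omega) hlow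
        · intro i h hi2
          have hxle : x ≤ s[mid.toNat]'(by omega) := by
            rw [← hget]; omega
          by_cases heq2 : i = mid.toNat
          · subst heq2; omega
          · have := hmono mid.toNat i (by omega) h (by omega)
            omega

-- pvRight on a sorted list, under the invariant, computes countP (· ≤ x).
lemma pvRight_eq (s : List Int) (x : Int)
    (hs : List.Pairwise (fun a b => a ≤ b) s) :
    ∀ (n : Nat) (lo hi : Int), (hi - lo).toNat = n →
      0 ≤ lo → lo ≤ hi → hi ≤ s.length →
      (∀ i (h : i < s.length), (i : Int) < lo → s[i] ≤ x) →
      (∀ i (h : i < s.length), hi ≤ (i : Int) → ¬ s[i] ≤ x) →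
      pvRight s x lo hi = (s.countP (fun y => decide (y ≤ x)) : Int) := by
  intro n
  induction n using Nat.strong_induction_on with
  | _ n ih =>
    intro lo hi hn h0 hlh hhl hlow hhigh
    rw [pvRight]
    by_cases hge : lo ≥ hi
    · have heq : lo = hi := le_antisymm hlh hge
      subst heq
      have : s.countP (fun y => decide (y ≤ x)) = lo.toNat := by
        apply countP_eq_of_prefix
        · omega
        · intro i h
          constructor
          · intro hp
            by_contra hc
            exact hhigh i h (by omega) (by simpa using hp)
          · intro hi2
            simpa using hlow i h (by omega)
      simp [this]; omega
    · simp only [dif_neg hge]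
      have hlt : lo < hi := lt_of_not_ge hge
      have hmid := PySem.Int.floordiv_two_mid_bounds (lo := lo) (hi := hi) hlh
      have hmidlt : PySem.Int.floordiv (lo + hi) 2 < hi :=
        (PySem.Int.floordiv_lt_iff_lt_mul (by norm_num)).mpr (by omega)
      set mid := PySem.Int.floordiv (lo + hi) 2 with hmiddef
      have hmr : mid < (s.length : Int) := lt_of_lt_of_le hmidlt hhl
      have hget : PySem.List.pyGetD s mid 0 = s[mid.toNat]'(by omega) :=
        PySem.List.pyGetD_eq_getElem s 0 (by omega) hmr
      have hmono := List.pairwise_iff_getElem.mp hs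
      by_cases hc : PySem.List.pyGetD s mid 0 ≤ x
      · rw [if_pos hc]
        apply ih (hi - (mid + 1)).toNat (by omega) (mid + 1) hi (rfl) (by omega) (by omega) hhl
        · intro i h hi2
          by_cases hieq : (i : Int) < lo
          · exact hlow i h hieq
          · have hile : i ≤ mid.toNat := by omega
            rcases lt_or_eq_of_le hile with hlt2 | heq2
            · exact le_trans (hmono i mid.toNat h (by omega) hlt2) (hget ▸ hc)
            · subst heq2; exact hget ▸ hc
        · exact hhigh
      · rw [if_neg hc]
        apply ih (mid - lo).toNat (by omega) lo mid (rfl) h0 (by omega) (by omega) hlow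
        · intro i h hi2
          have hxle : x < s[mid.toNat]'(by omega) := by
            rw [← hget]; omega
          by_cases heq2 : i = mid.toNat
          · subst heq2; omega
          · have := hmono mid.toNat i (by omega) h (by omega)
            omega

-- clamped difference of the two one-sided counts is the interval count
lemma clamp_count (l : List Int) (lo hi : Int) :
    max ((l.countP (fun y => decide (y ≤ hi)) : Int) - (l.countP (fun y => decide (y < lo)) : Int)) 0
      = (l.countP (fun y => decide (lo ≤ y) && decide (y ≤ hi)) : Int) := by
  by_cases hcase : lo ≤ hi
  · have hsplit : l.countP (fun y => decide (y ≤ hi))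
        = l.countP (fun y => decide (y < lo)) + l.countP (fun y => decide (lo ≤ y) && decide (y ≤ hi)) := by
      induction l with
      | nil => simp
      | cons a t ih =>
        simp only [List.countP_cons]
        by_cases h1 : a < lo
        · simp [h1, show a ≤ hi by omega, show ¬ lo ≤ a by omega]; omega
        · by_cases h2 : a ≤ hi
          · simp [h1, h2, show lo ≤ a by omega]; omega
          · simp [h1, h2]; omega
    rw [hsplit]; push_cast; omega
  · have h0 : l.countP (fun y => decide (lo ≤ y) && decide (y ≤ hi)) = 0 := by
      apply List.countP_eq_zero.mpr
      intro a _; simp; omega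
    have hle : l.countP (fun y => decide (y ≤ hi)) ≤ l.countP (fun y => decide (y < lo)) := by
      apply List.countP_mono_left
      intro a _ h; simp at h ⊢; omega
    rw [h0]; omega

-- per-range agreement
lemma range_count_eq (birthdays : List Int) (r : Int × Int) :
    (0 : Int) + (birthdays.countP (fun j => decide (j ≥ r.1 ∧ j ≤ r.2)) : Int)
      = max (pvRight (PySem.List.sorted birthdays (fun x => x)) r.2 0 (PySem.List.sorted birthdays (fun x => x)).length
              - pvLeft (PySem.List.sorted birthdays (fun x => x)) r.1 0 (PySem.List.sorted birthdays (fun x => x)).length) 0 := by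
  set s := PySem.List.sorted birthdays (fun x => x) with hs
  have hpair : List.Pairwise (fun a b => a ≤ b) s := by
    simpa using PySem.List.sorted_pairwise birthdays (fun x => x)
  have hperm : s.Perm birthdays := PySem.List.sorted_perm birthdays (fun x => x) false
  have hL : pvLeft s r.1 0 (s.length : Int) = (s.countP (fun y => decide (y < r.1)) : Int) := by
    apply pvLeft_eq s r.1 hpair ((s.length : Int) - 0).toNat 0 (s.length : Int) rfl le_rfl
      (by positivity) le_rfl
    · intro i h hi2; omega
    · intro i h hi2; omega
  have hR : pvRight s r.2 0 (s.length : Int) = (s.countP (fun y => decide (y ≤ r.2)) : Int) := by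
    apply pvRight_eq s r.2 hpair ((s.length : Int) - 0).toNat 0 (s.length : Int) rfl le_rfl
      (by positivity) le_rfl
    · intro i h hi2; omega
    · intro i h hi2; omega
  rw [hL, hR, clamp_count]
  have hpred : (fun j => decide (j ≥ r.1 ∧ j ≤ r.2)) = (fun y => decide (r.1 ≤ y) && decide (y ≤ r.2)) := by
    funext y; by_cases h1 : r.1 ≤ y <;> by_cases h2 : y ≤ r.2 <;> simp [h1, h2]
  rw [zero_add, hpred, hperm.countP_eq _]

-- ===== VERDICT (by name: the statement is the Claim_ definition above) =====
theorem birthday_ranges_spec : Claim_equal_birthday_ranges := by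
  intro birthdays ranges _
  unfold Spec_birthday_ranges birthday_ranges birthday_ranges_alt
  dsimp only
  simp only [PySem.List.foldl_append_singleton_eq_map, List.nil_append]
  apply List.map_congr_left
  intro r _
  rw [PySem.List.foldl_ite_add_one (fun j => j ≥ r.1 ∧ j ≤ r.2)]
  exact range_count_eq birthdays r
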